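-- pv_equiv track=rewrite | github.com/EvilBwala/QMB-Hamiltonian | Hamil.py | extract_phase
-- ===== SOURCE A (Python) =====
-- def extract_phase(z,k):
--     x=abs(z)
--     count=0
--     i=0
--     while(i<k-1):
--         count=count+(x&1)
--         x=x>>1
--         i=i+1
--     if(count%2==0):
--         return(1)
--     else:
--         return(-1)
-- ===== SOURCE B (Python) =====
-- def extract_phase(z, k):
--     if k <= 1:
--         return 1
--     return -1 if (abs(z) & ((1 << (k - 1)) - 1)).bit_count() & 1 else 1
-- ===== Notes on version B (the rewrite author's own statement) =====
-- stated objective: faster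
-- what changed: Replaced the bit-by-bit shift loop over the lower k-1 bits by a single mask (1<<(k-1))-1 followed by int.bit_count parity.
import Mathlib
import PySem

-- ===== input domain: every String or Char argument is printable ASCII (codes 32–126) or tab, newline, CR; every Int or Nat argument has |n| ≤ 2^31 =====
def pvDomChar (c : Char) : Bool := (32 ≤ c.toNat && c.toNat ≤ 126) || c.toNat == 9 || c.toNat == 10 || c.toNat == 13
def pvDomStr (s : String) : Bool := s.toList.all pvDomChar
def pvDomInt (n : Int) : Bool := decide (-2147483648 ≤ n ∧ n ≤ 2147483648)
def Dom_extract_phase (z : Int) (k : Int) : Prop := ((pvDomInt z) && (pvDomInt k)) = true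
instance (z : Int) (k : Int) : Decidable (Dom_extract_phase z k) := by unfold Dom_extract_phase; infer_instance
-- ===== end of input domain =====

-- B replaces A's bit-by-bit shift loop by one mask of the low k-1 bits plus a popcount parity test (objective: faster).

-- ===== PORT A =====
-- the while loop of A: runs `fuel` times, shifting x right and accumulating x&1
def pvALoop : Nat → Nat → Nat → Nat
  | 0, _, count => count
  | n + 1, x, count => pvALoop n (x >>> 1) (count + (x &&& 1))

def extract_phase (z : Int) (k : Int) : Int :=
  -- x = abs(z); while i < k-1 … : the loop body runs max(k-1,0) times
  let count := pvALoop (k - 1).toNat z.natAbs 0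
  if count % 2 == 0 then 1 else -1

-- ===== PORT B =====
-- int.bit_count, ported as the standard binary popcount recursion
def pvPopcount (n : Nat) : Nat :=
  if n = 0 then 0 else pvPopcount (n / 2) + n % 2
decreasing_by exact Nat.div_lt_self (Nat.pos_of_ne_zero (by assumption)) (by norm_num)

def extract_phase_alt (z : Int) (k : Int) : Int :=
  if k ≤ 1 then 1
  else if (pvPopcount (z.natAbs &&& ((1 <<< (k - 1).toNat) - 1))) &&& 1 ≠ 0 then -1 else 1

-- ===== PRECONDITION & SPEC =====
def Spec_extract_phase (z : Int) (k : Int) (out : Int) : Prop := out = extract_phase_alt z k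
instance (z : Int) (k : Int) (out : Int) : Decidable (Spec_extract_phase z k out) := by unfold Spec_extract_phase; infer_instance

-- ===== CLAIM (what is proved, stated in full; the proofs are below) =====
def Claim_equal_extract_phase : Prop := ∀ (z : Int) (k : Int), Dom_extract_phase z k → Spec_extract_phase z k (extract_phase z k)

-- ===== LEMMAS AND PROOFS =====

theorem pvPopcount_step (n : Nat) : pvPopcount n = pvPopcount (n / 2) + n % 2 := by
  rw [pvPopcount]
  split
  · simp_all [pvPopcount]
  · rfl

theorem pvPopcount_zero : pvPopcount 0 = 0 := by rw [pvPopcount]; simp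

theorem pvALoop_eq (n : Nat) : ∀ x c, pvALoop n x c = c + pvPopcount (x % 2 ^ n) := by
  induction n with
  | zero => intro x c; simp [pvALoop, Nat.mod_one, pvPopcount_zero]
  | succ n ih =>
    intro x c
    have h1 : x % 2 ^ (n + 1) % 2 = x % 2 := by
      rw [Nat.mod_mod_of_dvd _ (by exact dvd_pow_self 2 (Nat.succ_ne_zero n))]
    have h2 : x % 2 ^ (n + 1) / 2 = x / 2 % 2 ^ n := by
      rw [pow_succ', Nat.mod_mul_right_div_self]
    rw [pvALoop, ih, pvPopcount_step (x % 2 ^ (n + 1)), h1, h2]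
    simp [Nat.shiftRight_succ, Nat.and_one_is_mod]
    omega

theorem extract_phase_spec : Claim_equal_extract_phase := by
  intro z k _
  unfold Spec_extract_phase extract_phase extract_phase_alt
  rw [pvALoop_eq]
  rcases le_or_gt k 1 with hk | hk
  · have : (k - 1).toNat = 0 := by omega
    simp [this, Nat.mod_one, pvPopcount_zero, hk]
  · have hk' : ¬ k ≤ 1 := by omega
    have hmask : z.natAbs &&& ((1 <<< (k - 1).toNat) - 1) = z.natAbs % 2 ^ (k - 1).toNat := by
      rw [Nat.shiftLeft_eq, one_mul, Nat.and_two_pow_sub_one_eq_mod]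
    have ht : (k - 1).toNat = k.toNat - 1 := by omega
    rw [ht] at hmask
    simp only [hk', if_false, ht, hmask, Nat.zero_add, Nat.and_one_is_mod]
    rcases Nat.mod_two_eq_zero_or_one (pvPopcount (z.natAbs % 2 ^ (k.toNat - 1))) with h | h <;>
      simp [h]
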